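-- pv_equiv track=rewrite | github.com/macromeer/offline-wikipedia-rag | wikipedia_rag_kiwix.py | estimate_question_complexity
-- ===== SOURCE A (Python) =====
-- def estimate_question_complexity(question: str) -> int:
--     """
--     Estimate question complexity to determine how many articles to retrieve
--
--     Args:
--         question: User's question
--
--     Returns:
--         Number of articles to retrieve (3-7)
--     """
--     question_lower = question.lower()
--
--     # Complex question indicators
--     complexity_score = 0
--
--     # Multi-part questions (need multiple perspectives)
--     if ' and ' in question_lower:
--         complexity_score += 2
--     if ' vs ' in question_lower or ' versus ' in question_lower:
--         complexity_score += 3  # Comparisons need both sides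
--
--     # Comparison/relationship questions (need context from multiple articles)
--     if any(word in question_lower for word in ['compare', 'difference', 'versus', 'vs']):
--         complexity_score += 3
--     if any(word in question_lower for word in ['relationship', 'connect', 'relate', 'impact', 'affect', 'influence', 'cause']):
--         complexity_score += 2
--
--     # Deep/analytical questions (need comprehensive context)
--     if any(word in question_lower for word in ['how does', 'how do', 'why', 'explain']):
--         complexity_score += 2
--     if any(word in question_lower for word in ['history', 'evolution', 'development', 'origin']):
--         complexity_score += 2
--
--     # Broad conceptual questions
--     if any(word in question_lower for word in ['overview', 'summary', 'introduction', 'basics']):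
--         complexity_score += 1
--
--     # Future/prediction questions (need current state + theories)
--     if any(word in question_lower for word in ['future', 'prediction', 'will', 'going to']):
--         complexity_score += 2
--
--     # Long questions often need more context
--     if len(question.split()) > 12:
--         complexity_score += 1
--
--     # Map complexity to number of articles
--     # With better selection AI, we can retrieve more targeted articles
--     if complexity_score >= 6:
--         return 6  # Very complex - retrieve 6 articles
--     elif complexity_score >= 4:
--         return 5  # Complex - retrieve 5 articles
--     elif complexity_score >= 3:
--         return 4  # Moderate-complex - retrieve 4 articles
--     elif complexity_score >= 2:
--         return 4  # Moderate - retrieve 4 articles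
--     else:
--         return 3  # Simple - retrieve 3 articles (minimum)
-- ===== SOURCE B (Python) =====
-- # Multi-pattern single position-scan: one pass over the lowered question marks
-- # which keyword groups occur anywhere, then threshold arithmetic gives the count.
--
-- _PATTERNS = [
--     (' and ', 0), (' vs ', 1), (' versus ', 1),
--     ('compare', 2), ('difference', 2), ('versus', 2), ('vs', 2),
--     ('relationship', 3), ('connect', 3), ('relate', 3), ('impact', 3),
--     ('affect', 3), ('influence', 3), ('cause', 3),
--     ('how does', 4), ('how do', 4), ('why', 4), ('explain', 4),
--     ('history', 5), ('evolution', 5), ('development', 5), ('origin', 5),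
--     ('overview', 6), ('summary', 6), ('introduction', 6), ('basics', 6),
--     ('future', 7), ('prediction', 7), ('will', 7), ('going to', 7),
-- ]
-- _WEIGHTS = [2, 3, 3, 2, 2, 2, 1, 2]
--
--
-- def estimate_question_complexity(question: str) -> int:
--     q = question.lower()
--     matched = set()
--     for i in range(len(q)):
--         for pat, g in _PATTERNS:
--             if q.startswith(pat, i):
--                 matched.add(g)
--     score = sum(w for g, w in enumerate(_WEIGHTS) if g in matched)
--     if len(question.split()) > 12:
--         score += 1
--     return 3 + (score >= 2) + (score >= 4) + (score >= 6)
-- ===== Notes on version B (the rewrite author's own statement) =====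
-- stated objective: alternative
-- what changed: Instead of A's ten independent substring searches and a five-way elif mapping, B makes one left-to-right scan over the positions of the lowered question, marking in a set which keyword group starts at each position, then sums the matched groups' weights and maps the score to the article count by threshold arithmetic (3 + score>=2 + score>=4 + score>=6).
import Mathlib
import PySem

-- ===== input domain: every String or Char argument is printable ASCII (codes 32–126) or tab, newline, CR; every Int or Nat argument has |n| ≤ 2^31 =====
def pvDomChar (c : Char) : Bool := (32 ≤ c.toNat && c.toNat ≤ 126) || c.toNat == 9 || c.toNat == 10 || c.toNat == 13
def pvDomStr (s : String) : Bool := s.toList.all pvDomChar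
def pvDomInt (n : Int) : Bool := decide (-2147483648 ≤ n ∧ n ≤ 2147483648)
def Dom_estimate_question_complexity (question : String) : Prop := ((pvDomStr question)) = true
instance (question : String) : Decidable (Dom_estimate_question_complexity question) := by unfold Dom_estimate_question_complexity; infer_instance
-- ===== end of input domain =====

set_option maxHeartbeats 1000000


-- B replaces A's nine per-keyword substring searches with a single position scan
-- of the lowered question that marks matched keyword groups, then threshold
-- arithmetic; objective: alternative (same values, different traversal).

-- ===== PORT A =====
def estimate_question_complexity (question : String) : Int :=
  let question_lower := PySem.Str.lower question
  let s0 : Int := 0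
  let s1 := if PySem.Str.isIn " and " question_lower then s0 + 2 else s0
  let s2 := if PySem.Str.isIn " vs " question_lower || PySem.Str.isIn " versus " question_lower then s1 + 3 else s1
  let s3 := if ["compare", "difference", "versus", "vs"].any (fun w => PySem.Str.isIn w question_lower) then s2 + 3 else s2
  let s4 := if ["relationship", "connect", "relate", "impact", "affect", "influence", "cause"].any (fun w => PySem.Str.isIn w question_lower) then s3 + 2 else s3
  let s5 := if ["how does", "how do", "why", "explain"].any (fun w => PySem.Str.isIn w question_lower) then s4 + 2 else s4
  let s6 := if ["history", "evolution", "development", "origin"].any (fun w => PySem.Str.isIn w question_lower) then s5 + 2 else s5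
  let s7 := if ["overview", "summary", "introduction", "basics"].any (fun w => PySem.Str.isIn w question_lower) then s6 + 1 else s6
  let s8 := if ["future", "prediction", "will", "going to"].any (fun w => PySem.Str.isIn w question_lower) then s7 + 2 else s7
  let s9 := if (PySem.Str.split₀ question).length > 12 then s8 + 1 else s8
  if s9 ≥ 6 then 6
  else if s9 ≥ 4 then 5
  else if s9 ≥ 3 then 4
  else if s9 ≥ 2 then 4
  else 3

-- ===== PORT B =====
def pvPatterns : List (String × Int) :=
  [(" and ", 0), (" vs ", 1), (" versus ", 1),
   ("compare", 2), ("difference", 2), ("versus", 2), ("vs", 2),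
   ("relationship", 3), ("connect", 3), ("relate", 3), ("impact", 3),
   ("affect", 3), ("influence", 3), ("cause", 3),
   ("how does", 4), ("how do", 4), ("why", 4), ("explain", 4),
   ("history", 5), ("evolution", 5), ("development", 5), ("origin", 5),
   ("overview", 6), ("summary", 6), ("introduction", 6), ("basics", 6),
   ("future", 7), ("prediction", 7), ("will", 7), ("going to", 7)]

def pvWeights : List Int := [2, 3, 3, 2, 2, 2, 1, 2]

-- q.startswith(pat, i) with 0 ≤ i is ported exactly as Chars.startswith on q.toList.drop i.toNat
-- pvScan is the transliteration of B's double for-loop building the matched set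
def pvScan (q : List Char) : PySem.Set Int :=
  (PySem.List.pyRange 0 (q.length : Int) 1).foldl
    (fun acc i => pvPatterns.foldl
      (fun a pg => if PySem.Chars.startswith (q.drop i.toNat) pg.1.toList
                   then PySem.Set.add a pg.2 else a) acc)
    PySem.Set.empty

def estimate_question_complexity_alt (question : String) : Int :=
  let q := PySem.Str.lower question
  let matched : PySem.Set Int := pvScan q.toList
  let base : Int := (PySem.List.enumerate pvWeights 0).foldl
      (fun acc gw => if PySem.Set.contains matched gw.1 then acc + gw.2 else acc) 0
  let score := if (PySem.Str.split₀ question).length > 12 then base + 1 else base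
  3 + (if score ≥ 2 then (1 : Int) else 0) + (if score ≥ 4 then 1 else 0) + (if score ≥ 6 then 1 else 0)

-- ===== PRECONDITION & SPEC =====
def Spec_estimate_question_complexity (question : String) (out : Int) : Prop := out = estimate_question_complexity_alt question
instance (question : String) (out : Int) : Decidable (Spec_estimate_question_complexity question out) := by unfold Spec_estimate_question_complexity; infer_instance

-- ===== CLAIM =====
def Claim_equal_estimate_question_complexity : Prop := ∀ (question : String), Dom_estimate_question_complexity question → Spec_estimate_question_complexity question (estimate_question_complexity question)

-- ===== LEMMAS AND PROOFS =====

-- membership after the inner fold (over the pattern table at one position)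
theorem pv_mem_foldl_add {α : Type} (l : List α) (C : α → Bool) (key : α → Int)
    (acc : PySem.Set Int) (x : Int) :
    (x ∈ l.foldl (fun a y => if C y then PySem.Set.add a (key y) else a) acc) ↔
      x ∈ acc ∨ ∃ y ∈ l, C y = true ∧ key y = x := by
  induction l generalizing acc with
  | nil => simp
  | cons h t ih =>
    by_cases hc : C h <;> simp [List.foldl, hc, ih, PySem.Set.mem_add] <;> tauto

-- membership after the outer fold (over all positions)
theorem pv_mem_scan (q : List Char) (r : List Int) (acc : PySem.Set Int) (x : Int) :
    (x ∈ r.foldl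
        (fun acc i => pvPatterns.foldl
          (fun a pg => if PySem.Chars.startswith (q.drop i.toNat) pg.1.toList
                       then PySem.Set.add a pg.2 else a) acc) acc) ↔
      x ∈ acc ∨ ∃ i ∈ r, ∃ pg ∈ pvPatterns,
        PySem.Chars.startswith (q.drop i.toNat) pg.1.toList = true ∧ pg.2 = x := by
  induction r generalizing acc with
  | nil => simp
  | cons h t ih =>
    simp [List.foldl, ih, pv_mem_foldl_add]
    exact or_assoc

-- a non-empty pattern starts at some scanned position iff it is a substring
theorem pv_hit (sub q : List Char) (hsub : sub ≠ []) :
    (∃ i ∈ PySem.List.pyRange 0 (q.length : Int) 1,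
        PySem.Chars.startswith (q.drop i.toNat) sub = true) ↔
      PySem.Chars.isIn sub q = true := by
  rw [← PySem.Chars.exists_prefix_drop_iff_isIn]
  constructor
  · rintro ⟨i, _, hs⟩
    exact ⟨i.toNat, (PySem.Chars.startswith_iff _ _).1 hs⟩
  · rintro ⟨j, hj⟩
    by_cases hlt : j < q.length
    · refine ⟨(j : Int), ?_, ?_⟩
      · rw [PySem.List.mem_pyRange_one]; omega
      · rw [PySem.Chars.startswith_iff]; simpa using hj
    · exfalso
      have : q.drop j = [] := List.drop_eq_nil_of_le (by omega)
      rw [this] at hj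
      exact hsub (List.prefix_nil.mp hj)

-- the scanned set contains g iff some pattern of group g is a substring
theorem pv_contains_scan (q : List Char) (x : Int) :
    PySem.Set.contains (pvScan q) x
      = (pvPatterns.filter (fun pg => pg.2 == x)).any
          (fun pg => PySem.Chars.isIn pg.1.toList q) := by
  have hne : ∀ pg ∈ pvPatterns, pg.1.toList ≠ [] := by decide
  rw [Bool.eq_iff_iff]
  simp only [PySem.Set.contains, List.any_eq_true, List.mem_filter, beq_iff_eq]
  rw [show List.contains (pvScan q) x = true ↔ x ∈ pvScan q by simp]
  unfold pvScan
  rw [pv_mem_scan]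
  constructor
  · rintro (h | ⟨i, hi, pg, hpg, hsw, hx⟩)
    · simp [PySem.Set.empty] at h
    · exact ⟨pg, ⟨hpg, hx⟩, (pv_hit _ _ (hne pg hpg)).1 ⟨i, hi, hsw⟩⟩
  · rintro ⟨pg, ⟨hpg, hx⟩, hin⟩
    obtain ⟨i, hi, hsw⟩ := (pv_hit _ _ (hne pg hpg)).2 hin
    exact Or.inr ⟨i, hi, pg, hpg, hsw, hx⟩

-- proof-only helpers: each port's score, factored out so the mapping step works on small terms
def pvScoreA (question : String) : Int :=
  let question_lower := PySem.Str.lower question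
  let s0 : Int := 0
  let s1 := if PySem.Str.isIn " and " question_lower then s0 + 2 else s0
  let s2 := if PySem.Str.isIn " vs " question_lower || PySem.Str.isIn " versus " question_lower then s1 + 3 else s1
  let s3 := if ["compare", "difference", "versus", "vs"].any (fun w => PySem.Str.isIn w question_lower) then s2 + 3 else s2
  let s4 := if ["relationship", "connect", "relate", "impact", "affect", "influence", "cause"].any (fun w => PySem.Str.isIn w question_lower) then s3 + 2 else s3
  let s5 := if ["how does", "how do", "why", "explain"].any (fun w => PySem.Str.isIn w question_lower) then s4 + 2 else s4
  let s6 := if ["history", "evolution", "development", "origin"].any (fun w => PySem.Str.isIn w question_lower) then s5 + 2 else s5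
  let s7 := if ["overview", "summary", "introduction", "basics"].any (fun w => PySem.Str.isIn w question_lower) then s6 + 1 else s6
  let s8 := if ["future", "prediction", "will", "going to"].any (fun w => PySem.Str.isIn w question_lower) then s7 + 2 else s7
  if (PySem.Str.split₀ question).length > 12 then s8 + 1 else s8

def pvScoreB (question : String) : Int :=
  let q := PySem.Str.lower question
  let matched : PySem.Set Int := pvScan q.toList
  let base : Int := (PySem.List.enumerate pvWeights 0).foldl
      (fun acc gw => if PySem.Set.contains matched gw.1 then acc + gw.2 else acc) 0
  if (PySem.Str.split₀ question).length > 12 then base + 1 else base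

theorem pv_A_eq (question : String) :
    estimate_question_complexity question =
      (if pvScoreA question ≥ 6 then 6 else if pvScoreA question ≥ 4 then 5
       else if pvScoreA question ≥ 3 then 4 else if pvScoreA question ≥ 2 then 4 else 3) := rfl

theorem pv_B_eq (question : String) :
    estimate_question_complexity_alt question =
      3 + (if pvScoreB question ≥ 2 then (1 : Int) else 0)
        + (if pvScoreB question ≥ 4 then 1 else 0) + (if pvScoreB question ≥ 6 then 1 else 0) := rfl

theorem pv_c0 (q : List Char) :
    PySem.Set.contains (pvScan q) 0 = PySem.Chars.isIn " and ".toList q := by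
  rw [pv_contains_scan,
    show pvPatterns.filter (fun pg => pg.2 == (0 : Int)) = [(" and ", 0)] from by decide]
  simp [List.any_cons]

theorem pv_c1 (q : List Char) :
    PySem.Set.contains (pvScan q) 1 = (PySem.Chars.isIn " vs ".toList q || PySem.Chars.isIn " versus ".toList q) := by
  rw [pv_contains_scan,
    show pvPatterns.filter (fun pg => pg.2 == (1 : Int)) = [(" vs ", 1), (" versus ", 1)] from by decide]
  simp [List.any_cons]

theorem pv_c2 (q : List Char) :
    PySem.Set.contains (pvScan q) 2 = (PySem.Chars.isIn "compare".toList q || (PySem.Chars.isIn "difference".toList q || (PySem.Chars.isIn "versus".toList q || PySem.Chars.isIn "vs".toList q))) := by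
  rw [pv_contains_scan,
    show pvPatterns.filter (fun pg => pg.2 == (2 : Int)) = [("compare", 2), ("difference", 2), ("versus", 2), ("vs", 2)] from by decide]
  simp [List.any_cons]

theorem pv_c3 (q : List Char) :
    PySem.Set.contains (pvScan q) 3 = (PySem.Chars.isIn "relationship".toList q || (PySem.Chars.isIn "connect".toList q || (PySem.Chars.isIn "relate".toList q || (PySem.Chars.isIn "impact".toList q || (PySem.Chars.isIn "affect".toList q || (PySem.Chars.isIn "influence".toList q || PySem.Chars.isIn "cause".toList q)))))) := by
  rw [pv_contains_scan,
    show pvPatterns.filter (fun pg => pg.2 == (3 : Int)) = [("relationship", 3), ("connect", 3), ("relate", 3), ("impact", 3), ("affect", 3), ("influence", 3), ("cause", 3)] from by decide]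
  simp [List.any_cons]

theorem pv_c4 (q : List Char) :
    PySem.Set.contains (pvScan q) 4 = (PySem.Chars.isIn "how does".toList q || (PySem.Chars.isIn "how do".toList q || (PySem.Chars.isIn "why".toList q || PySem.Chars.isIn "explain".toList q))) := by
  rw [pv_contains_scan,
    show pvPatterns.filter (fun pg => pg.2 == (4 : Int)) = [("how does", 4), ("how do", 4), ("why", 4), ("explain", 4)] from by decide]
  simp [List.any_cons]

theorem pv_c5 (q : List Char) :
    PySem.Set.contains (pvScan q) 5 = (PySem.Chars.isIn "history".toList q || (PySem.Chars.isIn "evolution".toList q || (PySem.Chars.isIn "development".toList q || PySem.Chars.isIn "origin".toList q))) := by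
  rw [pv_contains_scan,
    show pvPatterns.filter (fun pg => pg.2 == (5 : Int)) = [("history", 5), ("evolution", 5), ("development", 5), ("origin", 5)] from by decide]
  simp [List.any_cons]

theorem pv_c6 (q : List Char) :
    PySem.Set.contains (pvScan q) 6 = (PySem.Chars.isIn "overview".toList q || (PySem.Chars.isIn "summary".toList q || (PySem.Chars.isIn "introduction".toList q || PySem.Chars.isIn "basics".toList q))) := by
  rw [pv_contains_scan,
    show pvPatterns.filter (fun pg => pg.2 == (6 : Int)) = [("overview", 6), ("summary", 6), ("introduction", 6), ("basics", 6)] from by decide]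
  simp [List.any_cons]

theorem pv_c7 (q : List Char) :
    PySem.Set.contains (pvScan q) 7 = (PySem.Chars.isIn "future".toList q || (PySem.Chars.isIn "prediction".toList q || (PySem.Chars.isIn "will".toList q || PySem.Chars.isIn "going to".toList q))) := by
  rw [pv_contains_scan,
    show pvPatterns.filter (fun pg => pg.2 == (7 : Int)) = [("future", 7), ("prediction", 7), ("will", 7), ("going to", 7)] from by decide]
  simp [List.any_cons]

theorem pv_scores_eq (question : String) : pvScoreA question = pvScoreB question := by
  unfold pvScoreA pvScoreB
  simp only [PySem.Str.isIn_eq, List.any_cons, List.any_nil, Bool.or_false]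
  rw [show PySem.List.enumerate pvWeights 0
        = [((0 : Int), (2 : Int)), (1, 3), (2, 3), (3, 2), (4, 2), (5, 2), (6, 1), (7, 2)] from by decide]
  generalize hM : pvScan (PySem.Str.lower question).toList = M
  simp only [List.foldl_cons, List.foldl_nil]
  simp only [← hM, pv_c0, pv_c1, pv_c2, pv_c3, pv_c4, pv_c5, pv_c6, pv_c7]
  rfl

-- A's five-way elif mapping agrees with B's threshold arithmetic, for every score
theorem pv_map2 (s : Int) :
    (if s ≥ 6 then (6 : Int) else if s ≥ 4 then 5 else if s ≥ 3 then 4 else if s ≥ 2 then 4 else 3)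
      = 3 + (if s ≥ 2 then (1 : Int) else 0) + (if s ≥ 4 then 1 else 0) + (if s ≥ 6 then 1 else 0) := by
  split_ifs <;> omega

-- ===== VERDICT =====
theorem estimate_question_complexity_spec : Claim_equal_estimate_question_complexity := by
  intro question _
  unfold Spec_estimate_question_complexity
  rw [pv_A_eq, pv_B_eq, pv_scores_eq, pv_map2]
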